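-- pv_equiv track=rewrite | github.com/fernandokm/nlg_metrics_similarity | src/metrics.py | flatten_input
-- ===== SOURCE A (Python) =====
-- from typing import (
--     Callable,
--     Iterable,
--     List,
--     Optional,
--     Sequence,
--     Tuple,
--     TypeVar,
-- )
--
-- def flatten_input(
--     candidates: List[str],
--     references: List[List[str]],
-- ) -> Tuple[List[str], List[str], List[Tuple[int, int]]]:
--     """Flattens a set of (candidate, list of references) pairs.
--
--     Args:
--         candidates (List[str]): a list of candidate sentences
--         references (List[List[str]]): a list containing, for each candidate sentence,
--             a list of reference sentences
--
--     Returns: (candidates_flat, references_flat, boundaries)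
--         candidates_flat (List[str]): a list of candidate sentences.
--             Each candidate sentence is repeated once per reference.
--         references_flat (List[str]): a list of corresponding reference
--             sentences.
--         boundaries (List[Tuple[int, int]]): a list of (start, end) pairs
--             indicating the indices where each candidate sentence starts
--             and ends in candidates_flat.
--     """
--     candidates_flat = []
--     references_flat = []
--     boundaries = []
--     for cand, refs in zip(candidates, references):
--         start = len(candidates_flat)
--         end = start + len(refs)
--         boundaries.append((start, end))
--         candidates_flat += [cand] * len(refs)
--         references_flat += refs
--     return candidates_flat, references_flat, boundaries
-- ===== SOURCE B (Python) =====
-- from itertools import accumulate, chain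
--
--
-- def flatten_input(candidates, references):
--     n = min(len(candidates), len(references))
--     refs = references[:n]
--     counts = [len(r) for r in refs]
--     offsets = list(accumulate(counts, initial=0))
--     boundaries = list(zip(offsets, offsets[1:]))
--     candidates_flat = [c for c, k in zip(candidates, counts) for _ in range(k)]
--     references_flat = list(chain.from_iterable(refs))
--     return candidates_flat, references_flat, boundaries
-- ===== Notes on version B (the rewrite author's own statement) =====
-- stated objective: alternative
-- what changed: Replaces the single interleaved accumulator loop with an index-table-first construction: per-candidate reference counts, a prefix-sum (itertools.accumulate) zipped into the boundary pairs, and two separate passes building candidates_flat by repetition and references_flat by chain.from_iterable.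
import Mathlib
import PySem

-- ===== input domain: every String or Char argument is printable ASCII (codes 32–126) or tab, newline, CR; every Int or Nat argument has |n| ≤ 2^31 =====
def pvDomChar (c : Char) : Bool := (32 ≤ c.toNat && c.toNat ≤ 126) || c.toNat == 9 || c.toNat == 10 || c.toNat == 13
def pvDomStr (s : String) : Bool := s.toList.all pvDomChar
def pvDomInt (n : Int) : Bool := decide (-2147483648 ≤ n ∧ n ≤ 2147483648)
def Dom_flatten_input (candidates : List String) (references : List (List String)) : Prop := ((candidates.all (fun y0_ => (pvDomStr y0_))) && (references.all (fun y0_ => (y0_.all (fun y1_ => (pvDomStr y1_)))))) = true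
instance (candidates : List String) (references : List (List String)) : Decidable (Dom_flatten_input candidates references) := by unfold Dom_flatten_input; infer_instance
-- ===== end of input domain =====

-- B is an alternative decomposition of A's single interleaved loop: an index table
-- (prefix sums of the reference counts) plus separate construction passes.

-- ===== PORT A =====
-- A: one loop over zip(candidates, references), extending all three accumulators in step.
def flatten_input (candidates : List String) (references : List (List String)) : List String × List String × (List (Int × Int)) :=
  (candidates.zip references).foldl
    (fun (st : List String × List String × (List (Int × Int))) cr =>
      let start : Int := st.1.length
      let stop : Int := start + (cr.2.length : Int)
      (st.1 ++ List.replicate cr.2.length cr.1, st.2.1 ++ cr.2, st.2.2 ++ [(start, stop)]))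
    ([], [], [])

-- ===== PORT B =====
-- B: counts, prefix-sum offsets (accumulate → List.scanl), boundaries = zip(offsets, offsets[1:]),
-- candidates_flat by repetition, references_flat by chain.from_iterable (flatMap id).
def flatten_input_alt (candidates : List String) (references : List (List String)) : List String × List String × (List (Int × Int)) :=
  let n := min candidates.length references.length
  let refs := references.take n
  let counts := refs.map List.length
  let offsets := counts.scanl (· + ·) (0 : Nat)
  let boundaries := (offsets.zip offsets.tail).map (fun p => ((p.1 : Int), (p.2 : Int)))
  let candidates_flat := (candidates.zip counts).flatMap (fun p => List.replicate p.2 p.1)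
  let references_flat := refs.flatMap id
  (candidates_flat, references_flat, boundaries)

-- ===== PRECONDITION & SPEC =====
def Spec_flatten_input (candidates : List String) (references : List (List String)) (out : List String × List String × (List (Int × Int))) : Prop := out = flatten_input_alt candidates references
instance (candidates : List String) (references : List (List String)) (out : List String × List String × (List (Int × Int))) : Decidable (Spec_flatten_input candidates references out) := by unfold Spec_flatten_input; infer_instance

-- ===== CLAIM (what is proved, stated in full; the proofs are below) =====
def Claim_equal_flatten_input : Prop := ∀ (candidates : List String) (references : List (List String)), Dom_flatten_input candidates references → Spec_flatten_input candidates references (flatten_input candidates references)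

-- ===== LEMMAS AND PROOFS =====

-- closed-form of the fold: structural recursion over the zipped pairs, with a running offset
def specFl : List (String × List String) → Nat → List String × List String × (List (Int × Int))
  | [], _ => ([], [], [])
  | (c, rs) :: ps, off =>
    let t := specFl ps (off + rs.length)
    (List.replicate rs.length c ++ t.1, rs ++ t.2.1, ((off : Int), (off : Int) + (rs.length : Int)) :: t.2.2)

-- boundary spec: structural version of zip(scanl, tail)
def bspec : List Nat → Nat → List (Int × Int)
  | [], _ => []
  | k :: ks, off => (((off : Int)), ((off : Int) + (k : Int))) :: bspec ks (off + k)

theorem foldA_eq (ps : List (String × List String)) (cf rf : List String) (bd : List (Int × Int)) :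
    ps.foldl
      (fun (st : List String × List String × (List (Int × Int))) cr =>
        let start : Int := st.1.length
        let stop : Int := start + (cr.2.length : Int)
        (st.1 ++ List.replicate cr.2.length cr.1, st.2.1 ++ cr.2, st.2.2 ++ [(start, stop)]))
      (cf, rf, bd)
    = (cf ++ (specFl ps cf.length).1, rf ++ (specFl ps cf.length).2.1, bd ++ (specFl ps cf.length).2.2) := by
  induction ps generalizing cf rf bd with
  | nil => simp [specFl]
  | cons p ps ih =>
    obtain ⟨c, rs⟩ := p
    simp only [List.foldl_cons]
    rw [ih]
    simp [specFl, List.append_assoc]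

theorem scanl_zip_eq (ks : List Nat) (off : Nat) :
    (((ks.scanl (· + ·) off).zip (ks.scanl (· + ·) off).tail).map (fun p => ((p.1 : Int), (p.2 : Int)))) = bspec ks off := by
  induction ks generalizing off with
  | nil => simp [List.scanl, bspec]
  | cons k ks ih =>
    have h : ks.scanl (· + ·) (off + k) = (off + k) :: (ks.scanl (· + ·) (off + k)).tail := by
      cases ks <;> simp [List.scanl_cons, List.scanl_nil]
    rw [List.scanl_cons, bspec, ← ih (off + k)]
    conv_lhs => rw [h]
    simp
    conv_rhs => rw [h]
    rw [List.tail_cons]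

theorem specFl_bd (ps : List (String × List String)) (off : Nat) :
    (specFl ps off).2.2 = bspec (ps.map (fun p => p.2.length)) off := by
  induction ps generalizing off with
  | nil => simp [specFl, bspec]
  | cons p ps ih => obtain ⟨c, rs⟩ := p; simp [specFl, bspec, ih]

theorem specFl_cf (ps : List (String × List String)) (off : Nat) :
    (specFl ps off).1 = ps.flatMap (fun p => List.replicate p.2.length p.1) := by
  induction ps generalizing off with
  | nil => simp [specFl]
  | cons p ps ih => obtain ⟨c, rs⟩ := p; simp [specFl, ih]

theorem specFl_rf (ps : List (String × List String)) (off : Nat) :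
    (specFl ps off).2.1 = ps.flatMap (fun p => p.2) := by
  induction ps generalizing off with
  | nil => simp [specFl]
  | cons p ps ih => obtain ⟨c, rs⟩ := p; simp [specFl, ih]

theorem zip_counts (cs : List String) (rs : List (List String)) :
    (cs.zip ((rs.take (min cs.length rs.length)).map List.length)).flatMap (fun p => List.replicate p.2 p.1)
    = (cs.zip rs).flatMap (fun p => List.replicate p.2.length p.1) := by
  induction cs generalizing rs with
  | nil => simp
  | cons c cs ih =>
    cases rs with
    | nil => simp
    | cons r rs =>
      simp only [List.length_cons, Nat.add_min_add_right, List.take_succ_cons, List.map_cons,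
        List.zip_cons_cons, List.flatMap_cons, ih]

theorem take_min_flat (cs : List String) (rs : List (List String)) :
    (rs.take (min cs.length rs.length)).flatMap id = (cs.zip rs).flatMap (fun p => p.2) := by
  induction cs generalizing rs with
  | nil => simp
  | cons c cs ih =>
    cases rs with
    | nil => simp
    | cons r rs =>
      simp only [List.length_cons, Nat.add_min_add_right, List.take_succ_cons, List.flatMap_cons,
        List.zip_cons_cons, ih]
      simp

theorem bspec_map (cs : List String) (rs : List (List String)) (off : Nat) :
    bspec ((rs.take (min cs.length rs.length)).map List.length) off
    = bspec ((cs.zip rs).map (fun p => p.2.length)) off := by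
  induction cs generalizing rs off with
  | nil => simp [bspec]
  | cons c cs ih =>
    cases rs with
    | nil => simp [bspec]
    | cons r rs =>
      simp only [List.length_cons, Nat.add_min_add_right, List.take_succ_cons, List.map_cons,
        List.zip_cons_cons, bspec]
      rw [ih]

-- ===== VERDICT (by name: the statement is the Claim_ definition above) =====
theorem flatten_input_spec : Claim_equal_flatten_input := by
  intro cs rs _
  unfold Spec_flatten_input flatten_input flatten_input_alt
  rw [foldA_eq]
  simp only [List.length_nil, List.nil_append, specFl_cf, specFl_rf, specFl_bd]
  rw [scanl_zip_eq, bspec_map, zip_counts, take_min_flat]
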